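-- pv_equiv track=rewrite | github.com/Arirou/RSA | RSA/Partie_D.py | ch_ascii
-- ===== SOURCE A (Python) =====
-- def transformation2(ch):
--     bloc = []
--     for i in range(0, len(ch), 2):
--         bloc.append(ch[i:i + 2])
--     return bloc
--
-- def ch_ascii(ch):
--     bloc = transformation2(ch)
--     code_ascii = []
--     bloc_nb = []
--     for i in range(len(bloc)):
--         for j in range(len(bloc[i])):
--             x = str(ord(bloc[i][j]))
--             while len(x) < 3:
--                 x = '0' + x
--             code_ascii.append(x)
--     code_ascii = transformation2(code_ascii)
--     for i in range(len(code_ascii)):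
--         nb = ''.join(code_ascii[i])
--         bloc_nb.append(nb)
--     return bloc_nb
-- ===== SOURCE B (Python) =====
-- def ch_ascii(ch):
--     # one pass; even positions start a new block, odd positions extend the last one
--     bloc_nb = []
--     for k, c in enumerate(ch):
--         code = format(ord(c), '03d')
--         if k % 2:
--             bloc_nb[-1] += code
--         else:
--             bloc_nb.append(code)
--     return bloc_nb
-- ===== Notes on version B (the rewrite author's own statement) =====
-- stated objective: simpler
-- what changed: Replaces the chunk-chars/flatten-codes/re-chunk/join pipeline (two transformation2 calls plus an intermediate flat code list) by a single enumerate pass that zero-pads each character's code to width three and either starts a new block (even index) or appends to the last block (odd index).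
import Mathlib
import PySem

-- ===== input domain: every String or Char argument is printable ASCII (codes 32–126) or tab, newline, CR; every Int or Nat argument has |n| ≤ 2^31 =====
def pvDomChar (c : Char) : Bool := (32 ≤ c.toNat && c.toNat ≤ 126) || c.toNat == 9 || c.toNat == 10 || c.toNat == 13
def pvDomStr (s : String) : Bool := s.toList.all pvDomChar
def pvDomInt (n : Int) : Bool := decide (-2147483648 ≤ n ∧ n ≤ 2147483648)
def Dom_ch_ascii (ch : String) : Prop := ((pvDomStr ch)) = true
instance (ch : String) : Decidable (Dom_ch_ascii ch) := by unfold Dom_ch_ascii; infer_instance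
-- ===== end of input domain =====

-- B replaces A's chunk/flatten/re-chunk/join pipeline by a single enumerate pass (simpler).

-- ===== PORT A =====
-- transformation2: for i in range(0, len(ch), 2): bloc.append(ch[i:i+2])
def pvTransf2 {α : Type} (l : List α) : List (List α) :=
  (PySem.List.pyRange 0 (l.length : Int) 2).foldl
    (fun acc i => acc ++ [PySem.List.slice l (some i) (some (i + 2))]) []

-- while len(x) < 3: x = '0' + x
def pvPad3 (x : List Char) : List Char :=
  if x.length < 3 then pvPad3 ('0' :: x) else x
termination_by 3 - x.length

def ch_ascii (ch : String) : List String :=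
  let bloc := pvTransf2 ch.toList
  let code_ascii := bloc.foldl
    (fun acc b => b.foldl
      (fun acc2 c => acc2 ++ [pvPad3 (PySem.Int.toChars (c.toNat : Int))]) acc) []
  let code2 := pvTransf2 code_ascii
  -- ''.join of a list of strings is concatenation of their characters (exact)
  code2.foldl (fun acc p => acc ++ [String.ofList p.flatten]) []

-- ===== PORT B =====
-- format(ord(c), '03d'): ord(c) ≥ 0, so this is zero-padding to minimum width 3 (exact)
def pvCode3 (c : Char) : List Char :=
  let s := PySem.Int.toChars (c.toNat : Int)
  List.replicate (3 - s.length) '0' ++ s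

-- loop body: if k % 2: bloc_nb[-1] += code  else: bloc_nb.append(code)
def pvStepB (out : List (List Char)) (kc : Int × Char) : List (List Char) :=
  let code := pvCode3 kc.2
  if PySem.Int.mod kc.1 2 ≠ 0 then out.dropLast ++ [out.getLastD [] ++ code]
  else out ++ [code]

def ch_ascii_alt (ch : String) : List String :=
  ((PySem.List.enumerate ch.toList).foldl pvStepB []).map String.ofList

-- ===== PRECONDITION & SPEC =====
def Spec_ch_ascii (ch : String) (out : List String) : Prop := out = ch_ascii_alt ch
instance (ch : String) (out : List String) : Decidable (Spec_ch_ascii ch out) := by unfold Spec_ch_ascii; infer_instance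

-- ===== CLAIM (what is proved, stated in full; the proofs are below) =====
def Claim_equal_ch_ascii : Prop := ∀ (ch : String), Dom_ch_ascii ch → Spec_ch_ascii ch (ch_ascii ch)

-- ===== LEMMAS AND PROOFS =====

-- semantic pairing used by the proofs only
def pvChunks2 {α : Type} : List α → List (List α)
  | [] => []
  | [a] => [[a]]
  | a :: b :: r => [a, b] :: pvChunks2 r

theorem pvPad3_eq (x : List Char) :
    pvPad3 x = List.replicate (3 - x.length) '0' ++ x := by
  by_cases h : x.length < 3
  · rw [pvPad3, if_pos h, pvPad3_eq ('0' :: x)]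
    simp only [List.length_cons]
    have : 3 - x.length = (3 - (x.length + 1)) + 1 := by omega
    rw [this, List.replicate_succ']
    simp
  · rw [pvPad3, if_neg h]
    have : 3 - x.length = 0 := by omega
    simp [this]
termination_by 3 - x.length

theorem pvChunks2_range {α : Type} (l : List α) :
    (List.range ((l.length + 1) / 2)).map (fun k => (l.drop (2 * k)).take 2)
      = pvChunks2 l := by
  match l with
  | [] => simp [pvChunks2]
  | [a] => simp [pvChunks2]
  | a :: b :: r =>
    have hlen : (((a :: b :: r).length + 1) / 2) = ((r.length + 1) / 2) + 1 := by
      simp only [List.length_cons]; omega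
    rw [hlen, List.range_succ_eq_map]
    simp only [List.map_cons, List.map_map]
    conv_rhs => rw [pvChunks2]
    refine congrArg₂ List.cons rfl ?_
    rw [← pvChunks2_range r]
    apply List.map_congr_left
    intro k _
    simp only [Function.comp_apply]
    have : 2 * (k + 1) = (2 * k) + 2 := by omega
    simp [this, List.drop_succ_cons]

theorem pvTransf2_eq_chunks2 {α : Type} (l : List α) :
    pvTransf2 l = pvChunks2 l := by
  unfold pvTransf2
  rw [PySem.List.foldl_append_singleton_eq_map, List.nil_append]
  rw [PySem.List.pyRange_of_pos 0 (l.length : Int) (by norm_num)]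
  by_cases hl : l = []
  · subst hl; simp [pvChunks2]
  · have hpos : (0 : Int) < (l.length : Int) := by
      have : l.length ≠ 0 := by simpa [List.length_eq_zero_iff] using hl
      omega
    rw [if_pos hpos]
    have hm : ((l.length : Int) - 0 + 2 - 1) / 2 = (((l.length + 1) / 2 : Nat) : Int) := by
      omega
    rw [hm, Int.toNat_natCast, List.map_map, ← pvChunks2_range l]
    apply List.map_congr_left
    intro k _
    simp only [Function.comp_apply]
    have h1 : (0 : Int) + 2 * (k : Int) = ((2 * k : Nat) : Int) := by push_cast; ring
    have h2 : (0 : Int) + 2 * (k : Int) + 2 = ((2 * k + 2 : Nat) : Int) := by push_cast; ring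
    rw [h2, h1, PySem.List.slice_natCast]
    congr 1
    omega

theorem pvChunks2_flatten {α : Type} (l : List α) : (pvChunks2 l).flatten = l := by
  match l with
  | [] => rfl
  | [a] => rfl
  | a :: b :: r => simp [pvChunks2, pvChunks2_flatten r]

theorem pvChunks2_map {α β : Type} (f : α → β) (l : List α) :
    pvChunks2 (l.map f) = (pvChunks2 l).map (List.map f) := by
  match l with
  | [] => rfl
  | [a] => rfl
  | a :: b :: r => simp [pvChunks2, pvChunks2_map f r]

theorem pvStepB_even (out : List (List Char)) (k : Int) (c : Char)
    (h : k % 2 = 0) : pvStepB out (k, c) = out ++ [pvCode3 c] := by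
  rw [pvStepB, if_neg]
  rw [PySem.Int.mod_eq_emod_of_pos (by norm_num)]
  simpa using h

theorem pvStepB_odd (out : List (List Char)) (k : Int) (c : Char)
    (h : k % 2 = 1) : pvStepB out (k, c) = out.dropLast ++ [out.getLastD [] ++ pvCode3 c] := by
  rw [pvStepB, if_pos]
  rw [PySem.Int.mod_eq_emod_of_pos (by norm_num)]
  omega

theorem pvFoldB (cs : List Char) (out : List (List Char)) (k : Int)
    (hk : 0 ≤ k) (he : k % 2 = 0) :
    (PySem.List.enumerate cs k).foldl pvStepB out
      = out ++ (pvChunks2 cs).map (fun b => (b.map pvCode3).flatten) := by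
  match cs with
  | [] => simp [PySem.List.enumerate, pvChunks2]
  | [a] =>
    simp only [PySem.List.enumerate, List.foldl_cons, List.foldl_nil]
    rw [pvStepB_even _ _ _ he]
    simp [pvChunks2]
  | a :: b :: r =>
    simp only [PySem.List.enumerate, List.foldl_cons]
    rw [pvStepB_even _ _ _ he, pvStepB_odd _ _ _ (by omega),
      List.dropLast_concat, List.getLastD_concat]
    rw [pvFoldB r (out ++ [pvCode3 a ++ pvCode3 b]) (k + 1 + 1) (by omega) (by omega)]
    simp [pvChunks2]

-- ===== VERDICT (by name: the statement is the Claim_ definition above) =====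
theorem ch_ascii_spec : Claim_equal_ch_ascii := by
  intro ch _
  show ch_ascii ch = ch_ascii_alt ch
  have hB : ch_ascii_alt ch
      = ((pvChunks2 ch.toList).map (fun b => (b.map pvCode3).flatten)).map String.ofList := by
    unfold ch_ascii_alt
    rw [pvFoldB ch.toList [] 0 le_rfl rfl, List.nil_append]
  rw [hB]
  have hcode : ∀ c : Char, pvPad3 (PySem.Int.toChars (c.toNat : Int)) = pvCode3 c := by
    intro c; rw [pvPad3_eq]; rfl
  -- inner two loops build the flat list of padded codes
  have hflat : (pvTransf2 ch.toList).foldl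
      (fun acc b => b.foldl
        (fun acc2 c => acc2 ++ [pvPad3 (PySem.Int.toChars (c.toNat : Int))]) acc) []
      = ch.toList.map pvCode3 := by
    have : ∀ (bl : List (List Char)) (acc : List (List Char)),
        bl.foldl (fun acc b => b.foldl
          (fun acc2 c => acc2 ++ [pvPad3 (PySem.Int.toChars (c.toNat : Int))]) acc) acc
        = acc ++ (bl.map (List.map pvCode3)).flatten := by
      intro bl
      induction bl with
      | nil => simp
      | cons b t ih =>
        intro acc
        simp only [List.foldl_cons, List.map_cons, List.flatten_cons, ih]
        rw [PySem.List.foldl_append_singleton_eq_map]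
        simp only [List.append_assoc]
        congr 2
        apply List.map_congr_left
        intro c _; exact hcode c
    rw [this, List.nil_append, pvTransf2_eq_chunks2, ← pvChunks2_map, pvChunks2_flatten]
  have hA : ch_ascii ch
      = (pvTransf2 ((pvTransf2 ch.toList).foldl
          (fun acc b => b.foldl
            (fun acc2 c => acc2 ++ [pvPad3 (PySem.Int.toChars (c.toNat : Int))]) acc) [])).foldl
          (fun acc p => acc ++ [String.ofList p.flatten]) [] := rfl
  rw [hA, hflat, PySem.List.foldl_append_singleton_eq_map, List.nil_append,
    pvTransf2_eq_chunks2, pvChunks2_map, List.map_map, List.map_map]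
  simp [Function.comp_def]
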